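-- pv_equiv track=rewrite | github.com/arasemre0131/CaFoscariUltimate | study_planner.py | _calculate_day_priority
-- ===== SOURCE A (Python) =====
-- from typing import Dict, List, Optional
--
-- def _calculate_day_priority(deadlines: List) -> str:
--     """Günün öncelik seviyesini hesapla"""
--     if any(d.get('priority') == 'CRITICAL' for d in deadlines):
--         return "CRITICAL"
--     elif any(d.get('priority') == 'HIGH' for d in deadlines):
--         return "HIGH"
--     elif deadlines:
--         return "MEDIUM"
--     else:
--         return "LOW"
-- ===== SOURCE B (Python) =====
-- def _calculate_day_priority(deadlines) -> str:
--     has_high = False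
--     for d in deadlines:
--         p = d.get('priority')
--         if p == 'CRITICAL':
--             return "CRITICAL"
--         if p == 'HIGH':
--             has_high = True
--     if has_high:
--         return "HIGH"
--     if deadlines:
--         return "MEDIUM"
--     return "LOW"
-- ===== Notes on version B (the rewrite author's own statement) =====
-- stated objective: alternative
-- what changed: Replaces A's two separate any() scans with a single pass that returns CRITICAL immediately and carries a has_high flag to decide afterwards.
import Mathlib
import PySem

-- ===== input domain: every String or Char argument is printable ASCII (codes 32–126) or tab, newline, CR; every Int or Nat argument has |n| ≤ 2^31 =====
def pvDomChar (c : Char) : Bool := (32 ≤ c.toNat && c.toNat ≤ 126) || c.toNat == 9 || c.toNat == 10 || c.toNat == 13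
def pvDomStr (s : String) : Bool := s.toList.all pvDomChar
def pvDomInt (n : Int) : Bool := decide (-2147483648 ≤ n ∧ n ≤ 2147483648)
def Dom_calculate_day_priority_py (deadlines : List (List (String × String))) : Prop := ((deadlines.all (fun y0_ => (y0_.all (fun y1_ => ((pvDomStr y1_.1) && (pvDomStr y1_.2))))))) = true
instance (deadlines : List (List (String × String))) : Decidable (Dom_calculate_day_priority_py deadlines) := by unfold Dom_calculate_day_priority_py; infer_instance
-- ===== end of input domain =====

-- ===== PORT A =====
-- One honest line: B makes a single short-circuiting pass with a has_high flag instead of A's two any() scans.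
def calculate_day_priority_py (deadlines : List (List (String × String))) : String :=
  if deadlines.any (fun d => (PySem.Dict.mk d).get? "priority" = some "CRITICAL") then "CRITICAL"
  else if deadlines.any (fun d => (PySem.Dict.mk d).get? "priority" = some "HIGH") then "HIGH"
  else if deadlines ≠ [] then "MEDIUM"
  else "LOW"

-- ===== PORT B =====
def cdpLoop (isEmpty : Bool) : List (List (String × String)) → Bool → String
  | [], has_high =>
      if has_high then "HIGH" else if !isEmpty then "MEDIUM" else "LOW"
  | d :: rest, has_high =>
      let p := (PySem.Dict.mk d).get? "priority"
      if p = some "CRITICAL" then "CRITICAL"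
      else cdpLoop isEmpty rest (has_high || decide (p = some "HIGH"))

def calculate_day_priority_py_alt (deadlines : List (List (String × String))) : String :=
  cdpLoop deadlines.isEmpty deadlines false

-- ===== PRECONDITION & SPEC =====
def Spec_calculate_day_priority_py (deadlines : List (List (String × String))) (out : String) : Prop := out = calculate_day_priority_py_alt deadlines
instance (deadlines : List (List (String × String))) (out : String) : Decidable (Spec_calculate_day_priority_py deadlines out) := by unfold Spec_calculate_day_priority_py; infer_instance

-- ===== CLAIM (what is proved, stated in full; the proofs are below) =====
def Claim_equal_calculate_day_priority_py : Prop := ∀ (deadlines : List (List (String × String))), Dom_calculate_day_priority_py deadlines → Spec_calculate_day_priority_py deadlines (calculate_day_priority_py deadlines)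

-- ===== LEMMAS AND PROOFS =====

-- ===== VERDICT (by name: the statement is the Claim_ definition above) =====
theorem cdpLoop_eq (e : Bool) (l : List (List (String × String))) (hh : Bool) :
    cdpLoop e l hh =
      if l.any (fun d => (PySem.Dict.mk d).get? "priority" = some "CRITICAL") then "CRITICAL"
      else if (hh || l.any (fun d => (PySem.Dict.mk d).get? "priority" = some "HIGH")) then "HIGH"
      else if !e then "MEDIUM" else "LOW" := by
  induction l generalizing hh with
  | nil => simp [cdpLoop]
  | cons d rest ih =>
      simp only [cdpLoop, List.any_cons]
      by_cases hc : (PySem.Dict.mk d).get? "priority" = some "CRITICAL"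
      · simp [hc]
      · simp only [hc, if_false]
        rw [ih]
        by_cases hr : rest.any (fun d => (PySem.Dict.mk d).get? "priority" = some "CRITICAL") = true
        · simp [hr]
        · simp only [hr, decide_false, Bool.false_or, Bool.or_assoc]
          rfl

theorem calculate_day_priority_py_spec : Claim_equal_calculate_day_priority_py := by
  intro deadlines _
  unfold Spec_calculate_day_priority_py calculate_day_priority_py calculate_day_priority_py_alt
  rw [cdpLoop_eq]
  cases deadlines <;> simp
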